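-- pv_equiv track=rewrite | github.com/Kenta-Han/TouristSpot | cgi-bin/mindmap_01/mypackage/other_def_medoid.py | EverySpot_Review
-- ===== SOURCE A (Python) =====
-- def EverySpot_Review(review_list):
-- 	review_wkt_group_by = []
-- 	review_wkt_group_by_spot = []
-- 	for i in range(len(review_list)):
-- 		try:
-- 			if review_list[i][0] == review_list[i+1][0]:
-- 				temp = review_list[i][1].split()
-- 				review_wkt_group_by_spot.extend(temp)
-- 				temp = []
-- 			else:
-- 				temp = review_list[i][1].split()
-- 				# temp.append(review_list[i][0]) #スポットIDを追加
-- 				review_wkt_group_by_spot.extend(temp)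
-- 				review_wkt_group_by.append(review_wkt_group_by_spot)
-- 				review_wkt_group_by_spot = []
-- 		except IndexError:
-- 			temp = review_list[i][1].split()
-- 			# temp.append(review_list[i][0]) #スポットIDを追加
-- 			review_wkt_group_by_spot.extend(temp)
-- 			review_wkt_group_by.append(review_wkt_group_by_spot)
-- 			review_wkt_group_by_spot = []
-- 	return review_wkt_group_by
-- ===== SOURCE B (Python) =====
-- def EverySpot_Review(review_list):
--     result = []
--     rest = review_list
--     while rest:
--         key = rest[0][0]
--         k = 1
--         while k < len(rest) and rest[k][0] == key:
--             k += 1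
--         run, rest = rest[:k], rest[k:]
--         words = []
--         for row in run:
--             words += row[1].split()
--         result.append(words)
--     return result
-- ===== Notes on version B (the rewrite author's own statement) =====
-- stated objective: simpler
-- what changed: Replaces A's index loop with try/except lookahead boundary detection by a run-detecting scan: find each maximal run of consecutive rows sharing the first row's spot ID, collect that run's words in an inner loop, and move past the run.
import Mathlib
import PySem

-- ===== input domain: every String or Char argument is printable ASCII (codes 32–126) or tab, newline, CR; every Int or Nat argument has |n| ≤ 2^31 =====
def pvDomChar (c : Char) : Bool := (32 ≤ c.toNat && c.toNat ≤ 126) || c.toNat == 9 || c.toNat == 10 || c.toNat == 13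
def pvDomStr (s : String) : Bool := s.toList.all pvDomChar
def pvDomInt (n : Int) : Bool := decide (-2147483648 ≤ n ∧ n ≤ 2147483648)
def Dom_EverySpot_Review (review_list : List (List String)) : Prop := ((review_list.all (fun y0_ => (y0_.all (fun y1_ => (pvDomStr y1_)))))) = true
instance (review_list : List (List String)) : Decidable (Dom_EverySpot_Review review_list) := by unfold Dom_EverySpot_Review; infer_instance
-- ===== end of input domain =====

-- B replaces A's index loop with try/except lookahead by a run-detecting scan (find each
-- maximal run of equal spot IDs, then collect its words); objective: simpler/idiomatic.

-- ===== PORT A =====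
-- A's for-i loop with state (review_wkt_group_by, review_wkt_group_by_spot) as structural
-- recursion over the remaining rows; the try/except lookahead review_list[i+1][0] becomes the
-- match on the tail (none = IndexError path). Row accesses row[0]/row[1] are written headD/getD;
-- on Pre_ (every row has ≥ 2 entries) the defaults are never used, which is exact.
def pvLoopA : List (List String) → List (List String) → List String → List (List String)
  | [], gb, _spot => gb
  | r :: rest, gb, spot =>
    let temp := PySem.Str.split₀ (r.getD 1 "")
    match rest with
    | next :: _ =>
      if r.headD "" == next.headD "" then pvLoopA rest gb (spot ++ temp)
      else pvLoopA rest (gb ++ [spot ++ temp]) []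
    | [] => gb ++ [spot ++ temp]

def EverySpot_Review (review_list : List (List String)) : List (List String) :=
  pvLoopA review_list [] []

-- ===== PORT B =====
-- words of one run: the inner `for row in run: words += row[1].split()` loop
def pvWords (run : List (List String)) : List String :=
  run.foldl (fun acc row => acc ++ PySem.Str.split₀ (row.getD 1 "")) []

-- Source B's outer while-loop: peel off the maximal run rest[:k] sharing the first row's key
-- (takeWhile/dropWhile = the k-scan plus the two slices), emit its word list, recurse on rest[k:].
def pvGroups (l : List (List String)) : List (List String) :=
  match l with
  | [] => []
  | r :: rest =>
    let key := r.headD ""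
    let run := rest.takeWhile (fun s => s.headD "" == key)
    let rest' := rest.dropWhile (fun s => s.headD "" == key)
    pvWords (r :: run) :: pvGroups rest'
termination_by l.length
decreasing_by
  simp only [List.length_cons]
  exact Nat.lt_succ_of_le (List.length_dropWhile_le _ _)

def EverySpot_Review_alt (review_list : List (List String)) : List (List String) :=
  pvGroups review_list

-- ===== PRECONDITION & SPEC =====
-- Pre_ excludes exactly the inputs on which the Python A raises IndexError: any row with fewer
-- than 2 entries makes review_list[i][0] or review_list[i][1] raise (inside the handler too).
def Pre_EverySpot_Review (review_list : List (List String)) : Prop :=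
  ∀ r ∈ review_list, 2 ≤ r.length
instance (review_list : List (List String)) : Decidable (Pre_EverySpot_Review review_list) := by
  unfold Pre_EverySpot_Review; infer_instance

def pvWitness_EverySpot_Review : List (List String) :=
  [["a", "nice view"], ["a", "too crowded"], ["b", "quiet spot"]]

def Spec_EverySpot_Review (review_list : List (List String)) (out : List (List String)) : Prop := out = EverySpot_Review_alt review_list
instance (review_list : List (List String)) (out : List (List String)) : Decidable (Spec_EverySpot_Review review_list out) := by unfold Spec_EverySpot_Review; infer_instance

-- ===== CLAIM (what is proved, stated in full; the proofs are below) =====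
def Claim_equal_EverySpot_Review : Prop := ∀ (review_list : List (List String)), Dom_EverySpot_Review review_list → Pre_EverySpot_Review review_list → Spec_EverySpot_Review review_list (EverySpot_Review review_list)

-- ===== LEMMAS AND PROOFS =====

-- pvGroups with the pending word list `spot` of A's state spliced into the first group
def pvWith (l : List (List String)) (spot : List String) : List (List String) :=
  match l with
  | [] => []
  | r :: rest =>
    (spot ++ pvWords (r :: rest.takeWhile (fun s => s.headD "" == r.headD ""))) ::
      pvGroups (rest.dropWhile (fun s => s.headD "" == r.headD ""))

theorem pvWords_eq_flatMap (run : List (List String)) :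
    pvWords run = run.flatMap (fun row => PySem.Str.split₀ (row.getD 1 "")) := by
  have h : ∀ (l : List (List String)) (a : List String),
      l.foldl (fun acc row => acc ++ PySem.Str.split₀ (row.getD 1 "")) a
        = a ++ l.flatMap (fun row => PySem.Str.split₀ (row.getD 1 "")) := by
    intro l
    induction l with
    | nil => intro a; simp
    | cons r rest ih =>
      intro a
      rw [List.foldl_cons, ih, List.flatMap_cons, List.append_assoc]
  unfold pvWords
  rw [h, List.nil_append]

theorem pvWith_nil_spot (l : List (List String)) : pvWith l [] = pvGroups l := by
  cases l with
  | nil => simp [pvWith, pvGroups]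
  | cons r rest => simp [pvWith, pvGroups]

theorem pvLoopA_eq_pvWith :
    ∀ (l : List (List String)) (gb : List (List String)) (spot : List String),
      pvLoopA l gb spot = gb ++ pvWith l spot := by
  intro l
  induction l with
  | nil => intro gb spot; simp [pvLoopA, pvWith]
  | cons r rest ih =>
    intro gb spot
    cases rest with
    | nil =>
      simp [pvLoopA, pvWith, pvGroups, pvWords]
    | cons next rest2 =>
      show (if (r.headD "" == next.headD "") = true then
              pvLoopA (next :: rest2) gb (spot ++ PySem.Str.split₀ (r.getD 1 ""))
            else pvLoopA (next :: rest2) (gb ++ [spot ++ PySem.Str.split₀ (r.getD 1 "")]) [])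
          = gb ++ pvWith (r :: next :: rest2) spot
      by_cases h : (r.headD "" == next.headD "") = true
      · have hk : next.head?.getD "" = r.head?.getD "" := by
          simpa [List.headD_eq_head?_getD] using (eq_of_beq h).symm
        rw [if_pos h, ih]
        simp only [pvWith]
        simp [pvWords_eq_flatMap, hk, List.flatMap_cons, List.append_assoc]
      · have hne : ¬ (next.head?.getD "" = r.head?.getD "") := by
          intro he
          exact h (by simp [List.headD_eq_head?_getD, he])
        rw [if_neg h, ih, pvWith_nil_spot]
        simp only [pvWith]
        simp [pvWords_eq_flatMap, hne, List.flatMap_cons]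

-- ===== VERDICT (by name: the statement is the Claim_ definition above) =====
theorem EverySpot_Review_spec : Claim_equal_EverySpot_Review := by
  intro review_list _hdom _hpre
  unfold Spec_EverySpot_Review EverySpot_Review EverySpot_Review_alt
  rw [pvLoopA_eq_pvWith, pvWith_nil_spot]
  simp
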